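-- pv_equiv track=rewrite | github.com/bgconley/wekadocs-matrix | src/query/planner.py | _select_default_version
-- ===== SOURCE A (Python) =====
-- from typing import Any, Dict, Optional, Tuple
--
-- def _select_default_version(versions: Dict[str, str]) -> str:
--     ranked = []
--     for version in versions.keys():
--         try:
--             ranked.append((int(version.lstrip("v")), version))
--         except ValueError:
--             ranked.append((0, version))
--     ranked.sort(reverse=True)
--     return ranked[0][1] if ranked else "v1"
-- ===== SOURCE B (Python) =====
-- def _select_default_version(versions):
--     def key(version):
--         try:
--             return (int(version.lstrip("v")), version)
--         except ValueError:
--             return (0, version)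
--     if not versions:
--         return "v1"
--     return max(versions, key=key)
-- ===== Notes on version B (the rewrite author's own statement) =====
-- stated objective: faster
-- what changed: Replaces A's build-a-ranked-list + full reverse sort + index-0 with a guarded single-pass max(versions, key=(parsed_int, version)) selection, same key and tie-breaking.
import Mathlib
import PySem

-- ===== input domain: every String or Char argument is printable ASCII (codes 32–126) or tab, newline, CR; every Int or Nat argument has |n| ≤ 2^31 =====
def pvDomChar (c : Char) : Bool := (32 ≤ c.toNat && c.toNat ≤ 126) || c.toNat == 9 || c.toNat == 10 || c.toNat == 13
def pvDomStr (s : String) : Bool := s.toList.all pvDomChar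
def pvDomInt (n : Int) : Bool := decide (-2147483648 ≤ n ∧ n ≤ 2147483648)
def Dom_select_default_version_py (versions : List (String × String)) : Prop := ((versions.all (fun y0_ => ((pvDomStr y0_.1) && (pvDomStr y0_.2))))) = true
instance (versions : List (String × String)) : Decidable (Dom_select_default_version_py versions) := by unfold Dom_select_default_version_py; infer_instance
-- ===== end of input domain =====

-- B replaces A's build-list + reverse-sort + take-index-0 by a single-pass max with the
-- same key; objective: simpler (and O(n) instead of O(n log n)), identical return values.

-- ===== PORT A =====
-- 'version.lstrip("v")' strips leading 'v' characters only: exactly List.dropWhile (· == 'v')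
-- on the code points; 'int(...)' with the ValueError fallback is the match on PySem.Int.ofChars?.
def select_default_version_py (versions : List (String × String)) : String :=
  match PySem.List.sorted2
      (versions.foldl (fun acc p =>
        acc ++ [match PySem.Int.ofChars? (p.1.toList.dropWhile (· == 'v')) with
                | some n => (n, p.1)
                | none => ((0 : Int), p.1)]) [])
      (fun t => t.1) (fun t => t.2) true with
  | t :: _ => t.2
  | [] => "v1"

-- ===== PORT B =====
-- B's inner 'key': (int(version.lstrip("v")) or 0 on ValueError, version); the second
-- component is the string itself, so only the Int part needs a helper.
def pvKeyB (version : String) : Int :=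
  match PySem.Int.ofChars? (version.toList.dropWhile (· == 'v')) with
  | some n => n
  | none => 0

-- 'if not versions: return "v1"' + 'max(versions, key=key)' : max2? is none exactly on [].
def select_default_version_py_alt (versions : List (String × String)) : String :=
  match PySem.List.max2? (versions.map (fun p => p.1)) pvKeyB (fun v => v) with
  | some v => v
  | none => "v1"

-- ===== PRECONDITION & SPEC =====
def Spec_select_default_version_py (versions : List (String × String)) (out : String) : Prop := out = select_default_version_py_alt versions
instance (versions : List (String × String)) (out : String) : Decidable (Spec_select_default_version_py versions out) := by unfold Spec_select_default_version_py; infer_instance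

-- ===== CLAIM (what is proved, stated in full; the proofs are below) =====
def Claim_equal_select_default_version_py : Prop := ∀ (versions : List (String × String)), Dom_select_default_version_py versions → Spec_select_default_version_py versions (select_default_version_py versions)

-- ===== LEMMAS AND PROOFS =====

-- head? after one insertBy step (the reverse order 'before'): new head is x iff x beats the old head
theorem pv_head?_insertBy {α : Type} (before : α → α → Bool) (x : α) (acc : List α) :
    (PySem.List.insertBy before x acc).head? =
      (match acc.head? with
       | none => some x
       | some m => if before x m then some x else some m) := by
  cases acc with
  | nil => simp [PySem.List.insertBy]
  | cons y ys =>
    simp only [PySem.List.insertBy, List.head?_cons]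
    split_ifs <;> simp

-- head? of the whole insertBy fold equals the running-max fold
theorem pv_head?_foldl_insertBy {α : Type} (before : α → α → Bool) (xs : List α) :
    ∀ acc : List α,
      (xs.foldl (fun a x => PySem.List.insertBy before x a) acc).head? =
        xs.foldl (fun o x =>
          match o with
          | none => some x
          | some m => if before x m then some x else some m) acc.head? := by
  induction xs with
  | nil => intro acc; rfl
  | cons x t ih =>
    intro acc
    simp only [List.foldl_cons]
    rw [ih, pv_head?_insertBy]

-- first element of sorted(xs, key, reverse=True) is max(xs, key) (same key, same tie rule)
theorem pv_head?_sorted2_rev {α κ₁ κ₂ : Type} [LT κ₁] [DecidableLT κ₁] [LT κ₂] [DecidableLT κ₂]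
    (xs : List α) (k1 : α → κ₁) (k2 : α → κ₂) :
    (PySem.List.sorted2 xs k1 k2 true).head? = PySem.List.max2? xs k1 k2 := by
  unfold PySem.List.sorted2 PySem.List.max2?
  rw [pv_head?_foldl_insertBy]
  rfl

-- A's ranked list is the key-decorated list of the dict's keys
theorem pv_ranked_eq_map (versions : List (String × String)) :
    versions.foldl (fun acc p =>
      acc ++ [match PySem.Int.ofChars? (p.1.toList.dropWhile (· == 'v')) with
              | some n => (n, p.1)
              | none => ((0 : Int), p.1)]) [] =
      (versions.map (fun p => p.1)).map (fun v => (pvKeyB v, v)) := by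
  rw [PySem.List.foldl_append_singleton_eq_map, List.map_map]
  refine List.map_congr_left (fun p _ => ?_)
  simp only [Function.comp, pvKeyB]
  cases PySem.Int.ofChars? (p.1.toList.dropWhile (· == 'v')) <;> rfl

-- max2? over the decorated pairs, keyed by the components, is max2? over the keys
theorem pv_max2?_map (ks : List String) :
    PySem.List.max2? (ks.map (fun v => (pvKeyB v, v))) (fun t => t.1) (fun t => t.2) =
      Option.map (fun v => (pvKeyB v, v)) (PySem.List.max2? ks pvKeyB (fun v => v)) := by
  unfold PySem.List.max2?
  rw [List.foldl_map]
  have hinit : (none : Option (Int × String)) = Option.map (fun v => (pvKeyB v, v)) none := rfl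
  conv_lhs => rw [hinit]
  apply List.foldl_hom
  intro o x
  cases o with
  | none => rfl
  | some m =>
    simp only [Option.map_some]
    split_ifs <;> rfl

-- ===== VERDICT (by name: the statement is the Claim_ definition above) =====
theorem select_default_version_py_spec : Claim_equal_select_default_version_py := by
  intro versions _
  show select_default_version_py versions = select_default_version_py_alt versions
  unfold select_default_version_py select_default_version_py_alt
  rw [pv_ranked_eq_map]
  have h := pv_head?_sorted2_rev ((versions.map (fun p => p.1)).map (fun v => (pvKeyB v, v)))
      (fun t : Int × String => t.1) (fun t : Int × String => t.2)
  rw [pv_max2?_map] at h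
  cases hm : PySem.List.max2? (versions.map (fun p => p.1)) pvKeyB (fun v => v) with
  | none =>
    rw [hm, Option.map_none, List.head?_eq_none_iff] at h
    rw [h]
  | some v =>
    rw [hm, Option.map_some] at h
    cases hs : PySem.List.sorted2 ((versions.map (fun p => p.1)).map (fun v => (pvKeyB v, v)))
        (fun t => t.1) (fun t => t.2) true with
    | nil => rw [hs] at h; simp at h
    | cons t rest =>
      rw [hs] at h
      simp only [List.head?_cons, Option.some.injEq] at h
      rw [h]
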